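-- pv_equiv track=rewrite | github.com/esteroliver/ProgramacaoComputadores | codeforces/lista-09/questao-E.py | ocorrencias_a
-- ===== SOURCE A (Python) =====
-- def ocorrencias_a(seq):
--     mono = 0
--     pal = []
--     pal = seq.split('b')
--     for i in pal:
--         if len(i) > 1:
--             mono += len(i)
--     return mono
-- ===== SOURCE B (Python) =====
-- def ocorrencias_a(seq):
--     total = 0
--     run = 0
--     for ch in seq:
--         if ch == 'b':
--             if run > 1:
--                 total += run
--             run = 0
--         else:
--             run += 1
--     if run > 1:
--         total += run
--     return total
-- ===== Notes on version B (the rewrite author's own statement) =====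
-- stated objective: alternative
-- what changed: Replaces split('b') plus a filtering loop over the pieces with a single character scan maintaining a run-length counter that is flushed into the total at each 'b' and at the end, allocating no substring list.
import Mathlib
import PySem

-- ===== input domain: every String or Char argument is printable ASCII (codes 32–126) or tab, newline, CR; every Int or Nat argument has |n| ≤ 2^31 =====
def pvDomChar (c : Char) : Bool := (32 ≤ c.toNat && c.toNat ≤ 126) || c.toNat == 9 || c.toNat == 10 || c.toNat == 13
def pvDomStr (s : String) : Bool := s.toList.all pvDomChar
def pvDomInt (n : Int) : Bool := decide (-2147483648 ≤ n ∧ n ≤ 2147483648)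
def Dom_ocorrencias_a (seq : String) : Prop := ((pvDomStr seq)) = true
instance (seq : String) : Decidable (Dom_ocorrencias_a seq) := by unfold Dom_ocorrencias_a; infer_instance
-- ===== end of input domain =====

-- B replaces split('b') + a filtering loop over the pieces by a single character
-- scan with a run-length counter (objective: alternative decomposition, same cost).

-- ===== PORT A =====
-- literal port: pal = seq.split('b'); for i in pal: if len(i) > 1: mono += len(i)
def ocorrencias_a (seq : String) : Int :=
  let pal := (PySem.Str.split? seq "b").getD []   -- sep "b" ≠ "", so split? is always some
  pal.foldl (fun mono i => if PySem.Str.len i > 1 then mono + PySem.Str.len i else mono) 0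

-- ===== PORT B =====
-- literal port of Source B: one pass, (total, run) state, final flush
def ocorrencias_a_alt (seq : String) : Int :=
  let st := seq.toList.foldl
    (fun (st : Int × Int) ch =>
      if ch = 'b' then (if st.2 > 1 then st.1 + st.2 else st.1, 0)
      else (st.1, st.2 + 1)) (0, 0)
  if st.2 > 1 then st.1 + st.2 else st.1

-- ===== PRECONDITION & SPEC =====
def Spec_ocorrencias_a (seq : String) (out : Int) : Prop := out = ocorrencias_a_alt seq
instance (seq : String) (out : Int) : Decidable (Spec_ocorrencias_a seq out) := by unfold Spec_ocorrencias_a; infer_instance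

-- ===== CLAIM (what is proved, stated in full; the proofs are below) =====
def Claim_equal_ocorrencias_a : Prop := ∀ (seq : String), Dom_ocorrencias_a seq → Spec_ocorrencias_a seq (ocorrencias_a seq)

-- ===== LEMMAS AND PROOFS =====

-- proof-only simple recursive split on 'b' (cur is the current piece, reversed)
def pvSplitAux : List Char → List Char → List (List Char)
  | cur, [] => [cur.reverse]
  | cur, c :: rest =>
      if c = 'b' then cur.reverse :: pvSplitAux [] rest else pvSplitAux (c :: cur) rest

theorem pv_go_eq (s : List Char) : ∀ (fuel : Nat) (cur : List Char) (acc : List (List Char)),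
    s.length ≤ fuel →
    PySem.Chars.splitOn.go ['b'] fuel s cur acc = acc.reverse ++ pvSplitAux cur s := by
  induction s with
  | nil =>
    intro fuel cur acc _
    cases fuel <;> simp [PySem.Chars.splitOn.go, pvSplitAux]
  | cons c rest ih =>
    intro fuel cur acc h
    cases fuel with
    | zero => simp at h
    | succ n =>
      by_cases hc : c = 'b'
      · subst hc
        simp only [PySem.Chars.splitOn.go, List.isPrefixOf,
          Bool.and_true, beq_self_eq_true, if_pos, List.length_cons,
          List.length_nil, List.drop_succ_cons, List.drop_zero]
        rw [ih n [] (cur.reverse :: acc) (by simpa using h)]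
        simp [pvSplitAux]
      · have hpre : List.isPrefixOf ['b'] (c :: rest) = false := by
          simp only [List.isPrefixOf, Bool.and_true]
          exact beq_false_of_ne fun h => hc h.symm
        simp only [PySem.Chars.splitOn.go, hpre, Bool.false_eq_true, if_neg, not_false_iff]
        rw [ih n (c :: cur) acc (by simpa using h)]
        simp [pvSplitAux, hc]

theorem pv_splitOn_eq (s : List Char) :
    PySem.Chars.splitOn s ['b'] = pvSplitAux [] s := by
  unfold PySem.Chars.splitOn
  rw [pv_go_eq s (s.length + 1) [] [] (by omega)]
  simp

theorem pv_scan_eq (s : List Char) : ∀ (cur : List Char) (total : Int),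
    (pvSplitAux cur s).foldl
      (fun mono i => if (i.length : Int) > 1 then mono + (i.length : Int) else mono) total
    = (let st := s.foldl
        (fun (st : Int × Int) ch =>
          if ch = 'b' then (if st.2 > 1 then st.1 + st.2 else st.1, 0)
          else (st.1, st.2 + 1)) (total, (cur.length : Int));
       if st.2 > 1 then st.1 + st.2 else st.1) := by
  induction s with
  | nil => intro cur total; simp [pvSplitAux]
  | cons c rest ih =>
    intro cur total
    by_cases hc : c = 'b'
    · subst hc
      simp only [pvSplitAux, if_pos, List.foldl_cons, List.length_reverse]
      rw [ih [] _]
      simp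
    · simp only [pvSplitAux, hc, if_neg, not_false_iff, List.foldl_cons]
      rw [ih (c :: cur) total]
      simp only [List.length_cons]
      push_cast
      ring_nf

-- ===== VERDICT (by name: the statement is the Claim_ definition above) =====
theorem ocorrencias_a_spec : Claim_equal_ocorrencias_a := by
  intro seq _
  unfold Spec_ocorrencias_a ocorrencias_a ocorrencias_a_alt
  have hb : ("b" : String).toList = ['b'] := rfl
  simp only [PySem.Str.split?, PySem.Chars.split?, hb, List.isEmpty_cons,
    Option.map_some, Option.getD_some, if_neg, Bool.false_eq_true, not_false_iff]
  rw [pv_splitOn_eq, List.foldl_map]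
  have := pv_scan_eq seq.toList [] 0
  simp only [List.length_nil, Nat.cast_zero] at this
  simpa [PySem.Str.len_eq] using this
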